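-- pv_equiv track=rewrite | github.com/jasperchongcode/legacy-learning-code | digital code/caesar.py | int_list_to_message
-- ===== SOURCE A (Python) =====
-- shift = {"a":0,
--          "b":1,
--          "c":2,
--          "d":3,
--          "e":4,
--          "f":5,
--          "g":6,
--          "h":7,
--          "i":8,
--          "j":9,
--          "k":10,
--          "l":11,
--          "m":12,
--          "n":13,
--          "o":14,
--          "p":15,
--          "q":16,
--          "r":17,
--          "s":18,
--          "t":19,
--          "u":20,
--          "v":21,
--          "w":22,
--          "x":23,
--          "y":24,
--          "z":25}
--
-- def int_list_to_message(shift_list):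
--  final_message = []
--  # message to text
--  for idx in shift_list:
--   letter = ""
--   for (key,value) in shift.items():
--    if value == idx:
--     letter = key
--   final_message.append(letter)
--  return final_message
-- ===== SOURCE B (Python) =====
-- def int_list_to_message(shift_list):
--     # arithmetic on character codes instead of scanning a 26-entry table
--     return [chr(97 + int(idx)) if idx in range(26) else "" for idx in shift_list]
-- ===== Notes on version B (the rewrite author's own statement) =====
-- stated objective: faster
-- what changed: Replaces the 26-entry dict plus inner linear scan per code with a single list comprehension computing each letter arithmetically (chr(97+idx)) under a range(26) membership guard, removing the per-element table scan.
import Mathlib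
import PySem

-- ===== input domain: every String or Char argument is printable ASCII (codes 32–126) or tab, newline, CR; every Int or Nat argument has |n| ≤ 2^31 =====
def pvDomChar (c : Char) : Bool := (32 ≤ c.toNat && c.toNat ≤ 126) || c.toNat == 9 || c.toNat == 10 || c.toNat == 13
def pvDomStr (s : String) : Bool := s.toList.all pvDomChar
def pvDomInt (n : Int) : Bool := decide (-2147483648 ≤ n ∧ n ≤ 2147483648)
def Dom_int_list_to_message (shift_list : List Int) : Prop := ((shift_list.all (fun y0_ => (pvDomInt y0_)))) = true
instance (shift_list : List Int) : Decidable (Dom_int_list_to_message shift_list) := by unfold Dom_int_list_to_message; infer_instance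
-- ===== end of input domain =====

-- B replaces A's 26-entry dict scan per code with direct character arithmetic under a range guard (idiomatic).


-- ===== PORT A =====
-- the module-level dict `shift` as an association list in insertion order
def shiftPairs : List (String × Int) :=
  [("a",0),("b",1),("c",2),("d",3),("e",4),("f",5),("g",6),("h",7),("i",8),("j",9),
   ("k",10),("l",11),("m",12),("n",13),("o",14),("p",15),("q",16),("r",17),("s",18),
   ("t",19),("u",20),("v",21),("w",22),("x",23),("y",24),("z",25)]

def int_list_to_message (shift_list : List Int) : List String :=
  shift_list.foldl
    (fun final_message idx =>
      final_message ++ [shiftPairs.foldl (fun letter kv => if kv.2 == idx then kv.1 else letter) ""])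
    []

-- ===== PORT B =====
def int_list_to_message_alt (shift_list : List Int) : List String :=
  shift_list.map (fun idx =>
    if 0 ≤ idx ∧ idx < 26 then String.ofList [Char.ofNat (97 + idx.toNat)] else "")

-- ===== PRECONDITION & SPEC =====
def Spec_int_list_to_message (shift_list : List Int) (out : List String) : Prop := out = int_list_to_message_alt shift_list
instance (shift_list : List Int) (out : List String) : Decidable (Spec_int_list_to_message shift_list out) := by unfold Spec_int_list_to_message; infer_instance

-- ===== CLAIM (what is proved, stated in full; the proofs are below) =====
def Claim_equal_int_list_to_message : Prop := ∀ (shift_list : List Int), Dom_int_list_to_message shift_list → Spec_int_list_to_message shift_list (int_list_to_message shift_list)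

-- ===== LEMMAS AND PROOFS =====
-- the scan keeps its accumulator when no table value matches idx
theorem fold_no_match (ps : List (String × Int)) (idx : Int) (acc : String)
    (h : ∀ kv ∈ ps, kv.2 ≠ idx) :
    ps.foldl (fun letter kv => if kv.2 == idx then kv.1 else letter) acc = acc := by
  induction ps generalizing acc with
  | nil => rfl
  | cons p t ih =>
    simp only [List.foldl]
    rw [if_neg (by simpa using h p (by simp)),
        ih _ (fun kv hkv => h kv (by simp [hkv]))]

theorem shiftPairs_bounds : ∀ kv ∈ shiftPairs, 0 ≤ kv.2 ∧ kv.2 < 26 := by decide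

-- per-element equality: A's inner table scan equals B's arithmetic letter
theorem letter_eq (idx : Int) :
    shiftPairs.foldl (fun letter kv => if kv.2 == idx then kv.1 else letter) ""
      = (if 0 ≤ idx ∧ idx < 26 then String.ofList [Char.ofNat (97 + idx.toNat)] else "") := by
  by_cases h : 0 ≤ idx ∧ idx < 26
  · obtain ⟨h1, h2⟩ := h
    interval_cases idx <;> decide
  · rw [if_neg h]
    exact fold_no_match shiftPairs idx "" (fun kv hkv => by
      have := shiftPairs_bounds kv hkv; omega)

theorem int_list_to_message_spec : Claim_equal_int_list_to_message := by
  intro shift_list _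
  unfold Spec_int_list_to_message int_list_to_message int_list_to_message_alt
  rw [PySem.List.foldl_append_singleton_eq_map]
  exact List.map_congr_left (fun idx _ => letter_eq idx)
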